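-- pv_equiv track=rewrite | github.com/C0d3V1r0/ddsds | server/api/security.py | _build_suppression_map
-- ===== SOURCE A (Python) =====
-- from collections import defaultdict
--
-- def _build_suppression_map(rows: list[dict[str, object]]) -> dict[tuple[str, str], dict[str, int]]:
--     grouped: dict[tuple[str, str], dict[str, int]] = defaultdict(lambda: {"suppressed_count": 0, "repeat_count": 0})
--     for row in rows:
--         event_type = str(row.get("event_type", ""))
--         source_key = str(row.get("source_ip", "")).strip() or "host"
--         status = str(row.get("status", ""))
--         if status == "suppressed":
--             grouped[(event_type, source_key)]["suppressed_count"] += 1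
--             grouped[(event_type, source_key)]["repeat_count"] += 1
--         elif status == "suppressed_duplicate":
--             grouped[(event_type, source_key)]["repeat_count"] += 1
--     return grouped
-- ===== SOURCE B (Python) =====
-- from collections import defaultdict, Counter
--
-- def _build_suppression_map(rows):
--     pairs = []
--     for row in rows:
--         status = str(row.get("status", ""))
--         if status in ("suppressed", "suppressed_duplicate"):
--             key = (str(row.get("event_type", "")), str(row.get("source_ip", "")).strip() or "host")
--             pairs.append((key, status == "suppressed"))
--     sup = Counter(k for k, s in pairs if s)
--     rep = Counter(k for k, _ in pairs)
--     out = defaultdict(lambda: {"suppressed_count": 0, "repeat_count": 0})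
--     for k in dict.fromkeys(k for k, _ in pairs):
--         out[k] = {"suppressed_count": sup[k], "repeat_count": rep[k]}
--     return out
-- ===== Notes on version B (the rewrite author's own statement) =====
-- stated objective: alternative
-- what changed: A mutates a defaultdict of per-key count dicts row by row; B first extracts the (key, is-suppressed) pairs of matching rows in one filtering pass, then builds the result from two Counters and an ordered dedup of the keys.
import Mathlib
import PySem

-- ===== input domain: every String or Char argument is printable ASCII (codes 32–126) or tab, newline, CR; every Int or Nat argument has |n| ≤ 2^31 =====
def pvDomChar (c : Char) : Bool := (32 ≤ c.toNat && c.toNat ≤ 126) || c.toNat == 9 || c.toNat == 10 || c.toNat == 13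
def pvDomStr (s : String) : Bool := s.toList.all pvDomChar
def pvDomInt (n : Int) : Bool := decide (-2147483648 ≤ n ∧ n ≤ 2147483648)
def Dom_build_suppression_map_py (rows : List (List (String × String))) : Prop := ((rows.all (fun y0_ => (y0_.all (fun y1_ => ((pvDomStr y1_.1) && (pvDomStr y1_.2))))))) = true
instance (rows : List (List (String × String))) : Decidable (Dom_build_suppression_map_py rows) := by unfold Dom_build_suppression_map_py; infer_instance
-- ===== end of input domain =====

-- B replaces A's one-pass defaultdict mutation by a filter-key-extraction pass plus two Counters and
-- an ordered dedup of the keys (objective: alternative decomposition, same asymptotic cost).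

-- ===== PORT A =====
-- A's per-row loop body as a helper (grouped[key][field] += 1 is Dict.modify key dflt (inner modify))
def pyRowStep (g : PySem.Dict (String × String) (PySem.Dict String Int))
    (row : List (String × String)) : PySem.Dict (String × String) (PySem.Dict String Int) :=
  let dflt : PySem.Dict String Int := PySem.Dict.ofList [("suppressed_count", 0), ("repeat_count", 0)]
  let r := PySem.Dict.ofList row
  let event_type := r.getD "event_type" ""
  let sk := PySem.Str.strip (r.getD "source_ip" "")
  let source_key := if sk = "" then "host" else sk
  let status := r.getD "status" ""
  if status = "suppressed" then
    ((g.modify (event_type, source_key) dflt (fun d => d.modify "suppressed_count" 0 (· + 1))).modify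
      (event_type, source_key) dflt (fun d => d.modify "repeat_count" 0 (· + 1)))
  else if status = "suppressed_duplicate" then
    g.modify (event_type, source_key) dflt (fun d => d.modify "repeat_count" 0 (· + 1))
  else g

def build_suppression_map_py (rows : List (List (String × String))) : List (String × String × List (String × Int)) :=
  let grouped := rows.foldl pyRowStep PySem.Dict.empty
  grouped.items.map (fun p => (p.1.1, p.1.2, p.2.items))

-- ===== PORT B =====
def build_suppression_map_py_alt (rows : List (List (String × String))) : List (String × String × List (String × Int)) :=
  let pairs : List ((String × String) × Bool) := rows.foldl (fun ps row =>
    let r := PySem.Dict.ofList row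
    let status := r.getD "status" ""
    if status = "suppressed" ∨ status = "suppressed_duplicate" then
      let sk := PySem.Str.strip (r.getD "source_ip" "")
      let key := (r.getD "event_type" "", if sk = "" then "host" else sk)
      ps ++ [(key, status == "suppressed")]
    else ps) []
  let sup := PySem.Dict.counter ((pairs.filter (·.2)).map (·.1))
  let rep := PySem.Dict.counter (pairs.map (·.1))
  (PySem.List.dedup (pairs.map (·.1))).map (fun k =>
    (k.1, k.2, [("suppressed_count", sup.getD k 0), ("repeat_count", rep.getD k 0)]))

-- ===== PRECONDITION & SPEC =====
def Spec_build_suppression_map_py (rows : List (List (String × String))) (out : List (String × String × List (String × Int))) : Prop := out = build_suppression_map_py_alt rows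
instance (rows : List (List (String × String))) (out : List (String × String × List (String × Int))) : Decidable (Spec_build_suppression_map_py rows out) := by unfold Spec_build_suppression_map_py; infer_instance

-- ===== CLAIM (what is proved, stated in full; the proofs are below) =====
def Claim_equal_build_suppression_map_py : Prop := ∀ (rows : List (List (String × String))), Dom_build_suppression_map_py rows → Spec_build_suppression_map_py rows (build_suppression_map_py rows)

-- ===== LEMMAS AND PROOFS =====

-- the defaultdict factory value
def pvDflt : PySem.Dict String Int := PySem.Dict.ofList [("suppressed_count", 0), ("repeat_count", 0)]

-- does the row's status match?
def pvCond (row : List (String × String)) : Bool :=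
  let status := (PySem.Dict.ofList row).getD "status" ""
  status == "suppressed" || status == "suppressed_duplicate"

-- normalized key and suppressed-flag of a matching row
def pvPair (row : List (String × String)) : (String × String) × Bool :=
  let r := PySem.Dict.ofList row
  let sk := PySem.Str.strip (r.getD "source_ip" "")
  ((r.getD "event_type" "", if sk = "" then "host" else sk),
   (r.getD "status" "") == "suppressed")

-- the inner-dict update a matching pair performs
def pvF (b : Bool) (d : PySem.Dict String Int) : PySem.Dict String Int :=
  if b then (d.modify "suppressed_count" 0 (· + 1)).modify "repeat_count" 0 (· + 1)
  else d.modify "repeat_count" 0 (· + 1)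

def pvStep (g : PySem.Dict (String × String) (PySem.Dict String Int))
    (p : (String × String) × Bool) : PySem.Dict (String × String) (PySem.Dict String Int) :=
  g.modify p.1 pvDflt (pvF p.2)

theorem pv_modify_modify {κ ν : Type} [BEq κ] [LawfulBEq κ] (g : PySem.Dict κ ν) (k : κ) (d0 : ν)
    (f1 f2 : ν → ν) : (g.modify k d0 f1).modify k d0 f2 = g.modify k d0 (fun x => f2 (f1 x)) := by
  simp [PySem.Dict.modify, PySem.Dict.getD_insert_self, PySem.Dict.insert_insert_self]

-- A's row step is pvStep on the matching pairs
theorem pv_rowStep_eq (g : PySem.Dict (String × String) (PySem.Dict String Int))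
    (row : List (String × String)) :
    pyRowStep g row = if pvCond row then pvStep g (pvPair row) else g := by
  unfold pyRowStep pvCond pvPair pvStep pvF pvDflt
  by_cases h1 : (PySem.Dict.ofList row).getD "status" "" = "suppressed"
  · simp [h1, pv_modify_modify]
  · by_cases h2 : (PySem.Dict.ofList row).getD "status" "" = "suppressed_duplicate"
    · simp [h2]
    · simp [h1, h2]

theorem pv_foldA (rows : List (List (String × String)))
    (g : PySem.Dict (String × String) (PySem.Dict String Int)) :
    rows.foldl pyRowStep g = ((rows.filter pvCond).map pvPair).foldl pvStep g := by
  induction rows generalizing g with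
  | nil => rfl
  | cons row rest ih =>
    rw [List.foldl_cons, List.filter_cons, pv_rowStep_eq]
    by_cases h : pvCond row
    · simp only [h, if_true, List.map_cons, List.foldl_cons]; exact ih _
    · simp only [h, Bool.false_eq_true, if_false]; exact ih _

-- B's accumulation loop is the same filter-and-map
theorem pv_foldB (rows : List (List (String × String))) :
    rows.foldl (fun ps row =>
      let r := PySem.Dict.ofList row
      let status := r.getD "status" ""
      if status = "suppressed" ∨ status = "suppressed_duplicate" then
        let sk := PySem.Str.strip (r.getD "source_ip" "")
        let key := (r.getD "event_type" "", if sk = "" then "host" else sk)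
        ps ++ [(key, status == "suppressed")]
      else ps) [] = (rows.filter pvCond).map pvPair := by
  have hstep : (fun (ps : List ((String × String) × Bool)) row =>
      let r := PySem.Dict.ofList row
      let status := r.getD "status" ""
      if status = "suppressed" ∨ status = "suppressed_duplicate" then
        let sk := PySem.Str.strip (r.getD "source_ip" "")
        let key := (r.getD "event_type" "", if sk = "" then "host" else sk)
        ps ++ [(key, status == "suppressed")]
      else ps) = fun ps row => if pvCond row then ps ++ [pvPair row] else ps := by
    funext ps row
    by_cases h : pvCond row
    · have h' : ((PySem.Dict.ofList row).getD "status" "" = "suppressed" ∨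
          (PySem.Dict.ofList row).getD "status" "" = "suppressed_duplicate") := by
        simpa [pvCond] using h
      simp only [h, if_true, h', pvPair]
    · have h' : ¬ ((PySem.Dict.ofList row).getD "status" "" = "suppressed" ∨
          (PySem.Dict.ofList row).getD "status" "" = "suppressed_duplicate") := by
        simpa [pvCond] using h
      simp only [h, Bool.false_eq_true, if_false, h']
  rw [hstep, PySem.List.foldl_append_if pvCond pvPair rows []]
  rfl

-- lookup after the grouping fold: fold pvF over the flags of the pairs at this key
theorem pv_getD_foldl (P : List ((String × String) × Bool))
    (g : PySem.Dict (String × String) (PySem.Dict String Int)) (k : String × String) :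
    (P.foldl pvStep g).getD k pvDflt =
      ((P.filter (fun p => p.1 == k)).map (·.2)).foldl (fun d b => pvF b d) (g.getD k pvDflt) := by
  induction P generalizing g with
  | nil => rfl
  | cons p rest ih =>
    rw [List.foldl_cons, List.filter_cons, ih]
    by_cases h : p.1 = k
    · simp only [h, beq_self_eq_true, if_true, List.map_cons, List.foldl_cons, pvStep,
        PySem.Dict.getD_modify]
    · have hb : (p.1 == k) = false := by simpa using h
      simp only [hb, Bool.false_eq_true, if_false, pvStep, PySem.Dict.getD_modify]
      have hk : ¬ (k = p.1) := fun hkk => h hkk.symm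
      simp [hk]

-- folding pvF over a flag list just counts
theorem pv_inner (flags : List Bool) (s r : Int) :
    flags.foldl (fun d b => pvF b d) (PySem.Dict.ofList [("suppressed_count", s), ("repeat_count", r)]) =
      PySem.Dict.ofList [("suppressed_count", s + flags.count true),
                         ("repeat_count", r + flags.length)] := by
  induction flags generalizing s r with
  | nil => simp
  | cons b rest ih =>
    cases b
    · rw [List.foldl_cons,
        show pvF false (PySem.Dict.ofList [("suppressed_count", s), ("repeat_count", r)]) =
          PySem.Dict.ofList [("suppressed_count", s), ("repeat_count", r + 1)] from rfl, ih]
      have h1 : r + 1 + (rest.length : Int) = r + ((rest.length : Int) + 1) := by ring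
      simp [h1]
    · rw [List.foldl_cons,
        show pvF true (PySem.Dict.ofList [("suppressed_count", s), ("repeat_count", r)]) =
          PySem.Dict.ofList [("suppressed_count", s + 1), ("repeat_count", r + 1)] from rfl, ih]
      have h1 : s + 1 + (rest.count true : Int) = s + ((rest.count true : Int) + 1) := by ring
      have h2 : r + 1 + (rest.length : Int) = r + ((rest.length : Int) + 1) := by ring
      simp [h1, h2]

theorem pv_countTrue (P : List ((String × String) × Bool)) (k : String × String) :
    ((P.filter (fun p => p.1 == k)).map (·.2)).count true =
      ((P.filter (·.2)).map (·.1)).count k := by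
  simp only [List.count, List.countP_map, List.countP_filter]
  apply List.countP_congr
  intro p _
  cases hb : p.2 <;> simp [hb, Function.comp]

theorem pv_len (P : List ((String × String) × Bool)) (k : String × String) :
    ((P.filter (fun p => p.1 == k)).map (·.2)).length = (P.map (·.1)).count k := by
  simp only [List.length_map, List.count, List.countP_map]
  rw [List.countP_eq_length_filter]
  simp [Function.comp_def]

-- main equivalence
theorem pv_main (rows : List (List (String × String))) :
    build_suppression_map_py rows = build_suppression_map_py_alt rows := by
  unfold build_suppression_map_py build_suppression_map_py_alt
  dsimp only
  rw [pv_foldA, pv_foldB]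
  set P := (rows.filter pvCond).map pvPair with hP
  have hnodup : (P.foldl pvStep PySem.Dict.empty).keys.Nodup := by
    simpa [pvStep] using PySem.Dict.nodup_keys_foldl_modify_key P (·.1) pvDflt
      (fun _ p => pvF p.2) PySem.Dict.empty (by simp)
  have hkeys : (P.foldl pvStep PySem.Dict.empty).keys = PySem.Set.ofList (P.map (·.1)) := by
    have := PySem.Dict.keys_foldl_modify_key P (·.1) pvDflt (fun _ p => pvF p.2) PySem.Dict.empty
    simpa [pvStep, PySem.Dict.keys_empty, PySem.Set.update_nil_left] using this
  rw [PySem.Dict.items_eq_map_keys _ hnodup pvDflt, hkeys, List.map_map,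
    PySem.List.dedup_eq_ofList]
  apply List.map_congr_left
  intro k _
  have hg : (P.foldl pvStep PySem.Dict.empty).getD k pvDflt =
      PySem.Dict.ofList [("suppressed_count",
          (0 : Int) + (((P.filter (fun p => p.1 == k)).map (·.2)).count true : Int)),
        ("repeat_count",
          (0 : Int) + (((P.filter (fun p => p.1 == k)).map (·.2)).length : Int))] := by
    rw [pv_getD_foldl, PySem.Dict.getD_empty]
    exact pv_inner _ 0 0
  simp only [Function.comp, hg, pv_countTrue, pv_len, PySem.Dict.getD_counter]
  simp
  rfl

-- ===== VERDICT (by name: the statement is the Claim_ definition above) =====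
theorem build_suppression_map_py_spec : Claim_equal_build_suppression_map_py := by
  intro rows _
  unfold Spec_build_suppression_map_py
  exact pv_main rows
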